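-- pv_equiv track=rewrite | github.com/chauhanswapnil/Coding-Challenges | CodeChef/Starters34/Products.py | solution
-- ===== SOURCE A (Python) =====
-- def solution(n,arr):
--     cp=0
--     cn=0
--     for i in range(n):
--         if arr[i] > 0:
--             cp+=1
--         if arr[i] < 0:
--             cn+=1
--
--     cpc = (cp * (cp-1)) // 2
--     cpn = (cn * (cn-1)) // 2
--
--     return cpc + cpn
-- ===== SOURCE B (Python) =====
-- def solution(n, arr):
--     # One pass over the first-n slice by value, accumulating same-sign pairs
--     # incrementally: each element adds the number of earlier same-sign elements.
--     # No index arithmetic and no closed-form combination / integer division.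
--     res = 0
--     cp = 0
--     cn = 0
--     k = n if n > 0 else 0
--     for v in arr[:k]:
--         if v > 0:
--             res += cp
--             cp += 1
--         elif v < 0:
--             res += cn
--             cn += 1
--     return res
-- ===== Notes on version B (the rewrite author's own statement) =====
-- stated objective: alternative
-- what changed: Replaces A's index loop that counts signs and then applies the closed-form C(cp,2)+C(cn,2) with a structural recursion over the first-n prefix that accumulates same-sign pairs incrementally (each element adds the number of earlier same-sign elements), with no post-loop combination formula or integer division.
import Mathlib
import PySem

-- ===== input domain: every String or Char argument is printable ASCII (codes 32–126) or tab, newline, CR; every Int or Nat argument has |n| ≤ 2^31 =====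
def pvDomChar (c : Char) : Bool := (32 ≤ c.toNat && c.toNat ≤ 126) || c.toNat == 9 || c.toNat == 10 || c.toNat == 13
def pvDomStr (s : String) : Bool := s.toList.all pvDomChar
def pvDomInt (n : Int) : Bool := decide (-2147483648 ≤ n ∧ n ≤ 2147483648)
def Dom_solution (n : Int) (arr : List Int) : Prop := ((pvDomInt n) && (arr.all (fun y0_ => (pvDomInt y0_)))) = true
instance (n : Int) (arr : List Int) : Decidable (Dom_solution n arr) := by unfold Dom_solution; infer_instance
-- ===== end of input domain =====

-- B iterates the first-n slice by value accumulating pairs incrementally, instead of A's index loop counting signs followed by the closed form C(cp,2)+C(cn,2); return value only, neither mutates.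

-- ===== PORT A =====
-- loop body of A: two independent ifs on arr[i] updating (cp, cn)
def pvStepA (arr : List Int) (s : Int × Int) (i : Int) : Int × Int :=
  let v := PySem.List.pyGetD arr i 0
  let s1 := if v > 0 then (s.1 + 1, s.2) else s
  if v < 0 then (s1.1, s1.2 + 1) else s1

def solution (n : Int) (arr : List Int) : Int :=
  let st := (PySem.List.pyRange 0 n 1).foldl (pvStepA arr) (0, 0)
  PySem.Int.floordiv (st.1 * (st.1 - 1)) 2 + PySem.Int.floordiv (st.2 * (st.2 - 1)) 2

-- ===== PORT B =====
-- loop body of B: if/elif on the element v updating (res, cp, cn)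
def pvStepB (s : Int × Int × Int) (v : Int) : Int × Int × Int :=
  if v > 0 then (s.1 + s.2.1, s.2.1 + 1, s.2.2)
  else if v < 0 then (s.1 + s.2.2, s.2.1, s.2.2 + 1)
  else s

def solution_alt (n : Int) (arr : List Int) : Int :=
  let k := if n > 0 then n else 0
  ((PySem.List.slice arr none (some k)).foldl pvStepB (0, 0, 0)).1

-- ===== PRECONDITION & SPEC =====
-- Pre_ excludes exactly the inputs where Python A raises IndexError (n greater than len(arr)).
def Pre_solution (n : Int) (arr : List Int) : Prop := n ≤ (arr.length : Int)
instance (n : Int) (arr : List Int) : Decidable (Pre_solution n arr) := by unfold Pre_solution; infer_instance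
def pvWitness_solution : Int × List Int := (4, [2, -1, 0, -3])

def Spec_solution (n : Int) (arr : List Int) (out : Int) : Prop := out = solution_alt n arr
instance (n : Int) (arr : List Int) (out : Int) : Decidable (Spec_solution n arr out) := by unfold Spec_solution; infer_instance

-- ===== CLAIM (what is proved, stated in full; the proofs are below) =====
def Claim_equal_solution : Prop := ∀ (n : Int) (arr : List Int), Dom_solution n arr → Pre_solution n arr → Spec_solution n arr (solution n arr)

-- ===== LEMMAS AND PROOFS =====

-- A's loop body viewed on the element value (proof helper)
def pvBodyA (t : Int × Int) (v : Int) : Int × Int :=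
  let s1 := if v > 0 then (t.1 + 1, t.2) else t
  if v < 0 then (s1.1, s1.2 + 1) else s1

-- A's index fold over range(n) equals a value fold over the first-n prefix (0 ≤ n ≤ len arr)
theorem pv_foldA_take (arr : List Int) (n : Int) (h0 : 0 ≤ n) (h1 : n ≤ (arr.length : Int)) (s : Int × Int) :
    (PySem.List.pyRange 0 n 1).foldl (pvStepA arr) s = (arr.take n.toNat).foldl pvBodyA s := by
  set xs := arr.take n.toNat with hxs
  have hlen : (xs.length : Int) = n := by
    simp only [hxs, List.length_take]
    omega
  have hcong : (PySem.List.pyRange 0 n 1).foldl (pvStepA arr) s =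
      (PySem.List.pyRange 0 n 1).foldl (fun acc j => pvBodyA acc (PySem.List.pyGetD xs j 0)) s := by
    apply PySem.List.foldl_congr_mem
    intro acc i hi
    rw [PySem.List.mem_pyRange_one] at hi
    have hget : PySem.List.pyGetD arr i 0 = PySem.List.pyGetD xs i 0 := by
      rw [PySem.List.pyGetD_eq_getElem arr (i:=i) 0 hi.1 (by omega),
          PySem.List.pyGetD_eq_getElem xs (i:=i) 0 hi.1 (by omega)]
      simp [hxs]
    simp only [pvStepA, pvBodyA, hget]
  rw [hcong, ← hlen]
  exact PySem.List.foldl_pyRange_zero_pyGetD' xs 0 pvBodyA s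

-- invariant relating B's triple fold to A's pair fold over the same element list
theorem pv_invariant (l : List Int) (res cp cn : Int) :
    (l.foldl pvStepB (res, cp, cn)).2.1 = (l.foldl pvBodyA (cp, cn)).1 ∧
    (l.foldl pvStepB (res, cp, cn)).2.2 = (l.foldl pvBodyA (cp, cn)).2 ∧
    2 * (l.foldl pvStepB (res, cp, cn)).1 =
      2 * res + (l.foldl pvBodyA (cp, cn)).1 * ((l.foldl pvBodyA (cp, cn)).1 - 1) - cp * (cp - 1)
              + (l.foldl pvBodyA (cp, cn)).2 * ((l.foldl pvBodyA (cp, cn)).2 - 1) - cn * (cn - 1) := by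
  induction l generalizing res cp cn with
  | nil => exact ⟨rfl, rfl, by simp only [List.foldl_nil]; ring⟩
  | cons v t ih =>
    simp only [List.foldl_cons]
    by_cases h1 : v > 0
    · have hA : pvBodyA (cp, cn) v = (cp + 1, cn) := by
        simp only [pvBodyA]; rw [if_pos h1, if_neg (by omega)]
      have hB : pvStepB (res, cp, cn) v = (res + cp, cp + 1, cn) := by
        simp only [pvStepB]; rw [if_pos h1]
      rw [hA, hB]
      obtain ⟨e1, e2, e3⟩ := ih (res + cp) (cp + 1) cn
      exact ⟨e1, e2, by rw [e3]; ring⟩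
    · by_cases h2 : v < 0
      · have hA : pvBodyA (cp, cn) v = (cp, cn + 1) := by
          simp only [pvBodyA]; rw [if_neg h1, if_pos h2]
        have hB : pvStepB (res, cp, cn) v = (res + cn, cp, cn + 1) := by
          simp only [pvStepB]; rw [if_neg h1, if_pos h2]
        rw [hA, hB]
        obtain ⟨e1, e2, e3⟩ := ih (res + cn) cp (cn + 1)
        exact ⟨e1, e2, by rw [e3]; ring⟩
      · have hA : pvBodyA (cp, cn) v = (cp, cn) := by
          simp only [pvBodyA]; rw [if_neg h1, if_neg h2]
        have hB : pvStepB (res, cp, cn) v = (res, cp, cn) := by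
          simp only [pvStepB]; rw [if_neg h1, if_neg h2]
        rw [hA, hB]
        exact ih res cp cn

theorem pv_floordiv_pair (x : Int) : PySem.Int.floordiv (x * (x - 1)) 2 * 2 = x * (x - 1) := by
  obtain ⟨a, ha⟩ := Int.even_mul_succ_self (x - 1)
  have hx : x * (x - 1) = 2 * a := by
    rw [show (x - 1) * (x - 1 + 1) = x * (x - 1) by ring] at ha; omega
  rw [hx, PySem.Int.floordiv_eq_ediv_of_pos (by omega)]
  omega

-- ===== VERDICT (by name: the statement is the Claim_ definition above) =====
theorem solution_spec : Claim_equal_solution := by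
  intro n arr _ hpre
  unfold Spec_solution solution solution_alt
  show PySem.Int.floordiv (((PySem.List.pyRange 0 n 1).foldl (pvStepA arr) (0, 0)).1 *
          (((PySem.List.pyRange 0 n 1).foldl (pvStepA arr) (0, 0)).1 - 1)) 2 +
       PySem.Int.floordiv (((PySem.List.pyRange 0 n 1).foldl (pvStepA arr) (0, 0)).2 *
          (((PySem.List.pyRange 0 n 1).foldl (pvStepA arr) (0, 0)).2 - 1)) 2 =
       ((PySem.List.slice arr none (some (if n > 0 then n else 0))).foldl pvStepB (0, 0, 0)).1
  by_cases hn : n > 0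
  · rw [if_pos hn, PySem.List.slice_to arr (by omega : (0:Int) ≤ n),
        pv_foldA_take arr n (by omega) hpre (0, 0)]
    obtain ⟨e1, e2, e3⟩ := pv_invariant (arr.take n.toNat) 0 0 0
    have h1 := pv_floordiv_pair ((arr.take n.toNat).foldl pvBodyA (0, 0)).1
    have h2 := pv_floordiv_pair ((arr.take n.toNat).foldl pvBodyA (0, 0)).2
    omega
  · rw [if_neg hn, PySem.List.pyRange_one_eq_nil (by omega),
        PySem.List.slice_to arr (by omega : (0:Int) ≤ 0)]
    simp [PySem.Int.floordiv]
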